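-- pv_equiv track=rewrite | github.com/serkanc/bambu-monitor | app/services/state_assembler.py | _detect_printer_model
-- ===== SOURCE A (Python) =====
-- from typing import Any, Dict
--
-- def _detect_printer_model(
--
--     module_index: dict[str, dict[str, Any]] | None,
--     master_data: Dict[str, Any],
-- ) -> str | None:
--     module_index = module_index or {}
--     preferred_modules = ("ota", "mb_core", "mb0")
--     for key in preferred_modules:
--         module = module_index.get(key)
--         if module:
--             product = module.get("product_name")
--             if product:
--                 return str(product)
--     for module in module_index.values():
--         product = module.get("product_name")
--         if product:
--             return str(product)
--
--     info_block = master_data.get("info")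
--     if isinstance(info_block, dict):
--         product = info_block.get("product_name")
--         if product:
--             return str(product)
--
--     print_section = master_data.get("print")
--     if isinstance(print_section, dict):
--         product = print_section.get("product_name")
--         if product:
--             return str(product)
--
--     return None
-- ===== SOURCE B (Python) =====
-- def _detect_printer_model(module_index, master_data):
--     # Reverse sweep: walk the candidate sources from lowest to highest priority,
--     # letting each truthy product_name overwrite the accumulator, so the
--     # highest-priority hit survives.  No early returns, no candidate list.
--     mi = module_index or {}
--     result = None
--     for section in ("print", "info"):
--         block = master_data.get(section)
--         if isinstance(block, dict):
--             product = block.get("product_name")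
--             if product:
--                 result = str(product)
--     for module in reversed(list(mi.values())):
--         product = module.get("product_name")
--         if product:
--             result = str(product)
--     for key in ("mb0", "mb_core", "ota"):
--         module = mi.get(key)
--         if module:
--             product = module.get("product_name")
--             if product:
--                 result = str(product)
--     return result
-- ===== Notes on version B (the rewrite author's own statement) =====
-- stated objective: alternative
-- what changed: Replaces A's four early-return blocks with a single reverse sweep: candidates are visited from lowest to highest priority and each truthy product_name overwrites an accumulator, so the highest-priority hit survives; no early returns and no candidate list.
import Mathlib
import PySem

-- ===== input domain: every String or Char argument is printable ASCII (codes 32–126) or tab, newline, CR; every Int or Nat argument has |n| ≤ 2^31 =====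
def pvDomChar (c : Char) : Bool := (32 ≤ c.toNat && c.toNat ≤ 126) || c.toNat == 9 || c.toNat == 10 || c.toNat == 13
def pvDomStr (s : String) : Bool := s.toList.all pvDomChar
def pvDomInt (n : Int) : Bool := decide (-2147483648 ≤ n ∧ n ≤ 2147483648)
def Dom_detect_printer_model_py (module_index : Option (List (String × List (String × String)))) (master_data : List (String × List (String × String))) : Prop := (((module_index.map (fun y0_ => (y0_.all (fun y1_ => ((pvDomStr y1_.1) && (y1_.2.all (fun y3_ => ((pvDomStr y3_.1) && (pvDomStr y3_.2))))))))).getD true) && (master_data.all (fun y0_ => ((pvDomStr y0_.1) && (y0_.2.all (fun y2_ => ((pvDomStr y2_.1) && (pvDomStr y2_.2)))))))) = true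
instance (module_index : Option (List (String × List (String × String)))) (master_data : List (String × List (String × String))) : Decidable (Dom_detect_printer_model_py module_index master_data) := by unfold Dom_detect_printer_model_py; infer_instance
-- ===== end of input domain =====

-- B scans the candidate sources in REVERSE priority order with an overwrite accumulator
-- (last writer = highest priority) instead of A's four forward early-return blocks
-- (objective: alternative traversal order, proved to yield the same first match).
-- On the Lean type every master_data value is a dict, so Python's `isinstance(block, dict)`
-- guard corresponds exactly to the key being present.

-- ===== PORT A =====
-- `product = d.get("product_name"); if product: return str(product)` (str of a string is itself on Dom)
def pvProduct (mod : List (String × String)) : Option String :=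
  match PySem.Dict.get? (PySem.Dict.ofList mod) "product_name" with
  | some p => if p ≠ "" then some p else none
  | none => none

-- first loop of A: over the preferred keys
def pvALoopPref (m : PySem.Dict String (List (String × String))) : List String → Option String
  | [] => none
  | k :: ks =>
    match PySem.Dict.get? m k with
    | some mod =>
      if mod ≠ [] then
        match pvProduct mod with
        | some p => some p
        | none => pvALoopPref m ks
      else pvALoopPref m ks
    | none => pvALoopPref m ks

-- second loop of A: over module_index.values()
def pvALoopVals : List (List (String × String)) → Option String
  | [] => none
  | mod :: rest =>
    match pvProduct mod with
    | some p => some p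
    | none => pvALoopVals rest

-- trailing `print` block of A
def pvAPrint (mdd : PySem.Dict String (List (String × String))) : Option String :=
  match PySem.Dict.get? mdd "print" with
  | some pb => pvProduct pb
  | none => none

def detect_printer_model_py (module_index : Option (List (String × List (String × String)))) (master_data : List (String × List (String × String))) : Option String :=
  let m := PySem.Dict.ofList (module_index.getD [])   -- module_index = module_index or {}
  match pvALoopPref m ["ota", "mb_core", "mb0"] with
  | some p => some p
  | none =>
    match pvALoopVals (PySem.Dict.values m) with
    | some p => some p
    | none =>
      let mdd := PySem.Dict.ofList master_data
      match PySem.Dict.get? mdd "info" with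
      | some ib =>
        match pvProduct ib with
        | some p => some p
        | none => pvAPrint mdd
      | none => pvAPrint mdd

-- ===== PORT B =====
-- `if product: result = str(product)` — overwrite the accumulator on a truthy product
def pvBUpd (res : Option String) (mod : List (String × String)) : Option String :=
  match pvProduct mod with
  | some p => some p
  | none => res

-- Source B's first loop: sections "print" then "info" (dict-guard = key present on this type)
def pvBSections (mdd : PySem.Dict String (List (String × String))) (res : Option String) : Option String :=
  (["print", "info"] : List String).foldl (fun res sec =>
    match PySem.Dict.get? mdd sec with
    | some b => pvBUpd res b
    | none => res) res

-- Source B's second loop: reversed(list(mi.values()))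
def pvBVals (m : PySem.Dict String (List (String × String))) (res : Option String) : Option String :=
  (PySem.Dict.values m).reverse.foldl pvBUpd res

-- Source B's third loop: the preferred keys, lowest priority first
def pvBPref (m : PySem.Dict String (List (String × String))) (res : Option String) : Option String :=
  (["mb0", "mb_core", "ota"] : List String).foldl (fun res k =>
    match PySem.Dict.get? m k with
    | some mod => if mod ≠ [] then pvBUpd res mod else res
    | none => res) res

def detect_printer_model_py_alt (module_index : Option (List (String × List (String × String)))) (master_data : List (String × List (String × String))) : Option String :=
  let m := PySem.Dict.ofList (module_index.getD [])
  pvBPref m (pvBVals m (pvBSections (PySem.Dict.ofList master_data) none))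

-- ===== PRECONDITION & SPEC =====
def Spec_detect_printer_model_py (module_index : Option (List (String × List (String × String)))) (master_data : List (String × List (String × String))) (out : Option String) : Prop := out = detect_printer_model_py_alt module_index master_data
instance (module_index : Option (List (String × List (String × String)))) (master_data : List (String × List (String × String))) (out : Option String) : Decidable (Spec_detect_printer_model_py module_index master_data out) := by unfold Spec_detect_printer_model_py; infer_instance

-- ===== CLAIM (what is proved, stated in full; the proofs are below) =====
def Claim_equal_detect_printer_model_py : Prop := ∀ (module_index : Option (List (String × List (String × String)))) (master_data : List (String × List (String × String))), Dom_detect_printer_model_py module_index master_data → Spec_detect_printer_model_py module_index master_data (detect_printer_model_py module_index master_data)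

-- ===== LEMMAS AND PROOFS =====

-- reverse-fold overwrite over the values = forward first-match scan with fallback
theorem pvBVals_eq (m : PySem.Dict String (List (String × String))) (r : Option String) :
    pvBVals m r = match pvALoopVals (PySem.Dict.values m) with
      | some p => some p
      | none => r := by
  unfold pvBVals
  rw [List.foldl_reverse]
  induction PySem.Dict.values m with
  | nil => rfl
  | cons v vs ih =>
    simp only [List.foldr_cons, pvALoopVals, ih]
    cases hv : pvProduct v with
    | some p => simp [pvBUpd, hv]
    | none =>
      simp only [pvBUpd, hv]

-- the reversed preferred-key loop = A's forward preferred-key loop with fallback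
theorem pvBPref_eq (m : PySem.Dict String (List (String × String))) (r : Option String) :
    pvBPref m r = match pvALoopPref m ["ota", "mb_core", "mb0"] with
      | some p => some p
      | none => r := by
  unfold pvBPref
  have h : (["mb0", "mb_core", "ota"] : List String)
      = (["ota", "mb_core", "mb0"] : List String).reverse := rfl
  rw [h, List.foldl_reverse]
  induction (["ota", "mb_core", "mb0"] : List String) with
  | nil => rfl
  | cons k ks ih =>
    simp only [List.foldr_cons, pvALoopPref, ih]
    cases PySem.Dict.get? m k with
    | none => rfl
    | some mod =>
      by_cases hm : mod = []
      · simp [hm]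
      · simp only [hm, ne_eq, not_false_eq_true, if_pos]
        cases hv : pvProduct mod with
        | some p => simp [pvBUpd, hv]
        | none =>
          simp only [pvBUpd, hv]

-- the section loop ("print" then "info", info overwrites) = A's info-then-print blocks
theorem pvBSections_eq (mdd : PySem.Dict String (List (String × String))) :
    pvBSections mdd none = match PySem.Dict.get? mdd "info" with
      | some ib =>
        (match pvProduct ib with
         | some p => some p
         | none => pvAPrint mdd)
      | none => pvAPrint mdd := by
  unfold pvBSections pvAPrint
  simp only [List.foldl_cons, List.foldl_nil]
  cases PySem.Dict.get? mdd "info" with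
  | none =>
    cases PySem.Dict.get? mdd "print" with
    | none => rfl
    | some pb => simp [pvBUpd]; cases pvProduct pb <;> rfl
  | some ib =>
    cases hp : pvProduct ib with
    | some p =>
      cases PySem.Dict.get? mdd "print" with
      | none => simp [pvBUpd, hp]
      | some pb => simp only [pvBUpd, hp]
    | none =>
      cases PySem.Dict.get? mdd "print" with
      | none => simp [pvBUpd, hp]
      | some pb => simp only [pvBUpd, hp]; cases pvProduct pb <;> rfl

theorem pv_ports_agree (module_index : Option (List (String × List (String × String)))) (master_data : List (String × List (String × String))) :
    detect_printer_model_py module_index master_data = detect_printer_model_py_alt module_index master_data := by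
  unfold detect_printer_model_py detect_printer_model_py_alt
  rw [pvBPref_eq, pvBVals_eq, pvBSections_eq]

-- ===== VERDICT (by name: the statement is the Claim_ definition above) =====
theorem detect_printer_model_py_spec : Claim_equal_detect_printer_model_py := by
  intro mi md _
  exact pv_ports_agree mi md
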